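-- pv_equiv track=rewrite | github.com/HoffmanThomas/unsupervised-learners | RL_Learner/cleandata.py | threatLevel
-- ===== SOURCE A (Python) =====
-- def threatLevel(levels):
-- 	low = []
-- 	med = []
-- 	high = []
-- 	undef = []
--
-- 	for level in levels[1:]:
-- 		if level == 'Low':
-- 			low.append('Low')
-- 			med.append(None)
-- 			high.append(None)
-- 			undef.append(None)
--
-- 		elif level == 'Medium':
-- 			low.append(None)
-- 			med.append('Medium')
-- 			high.append(None)
-- 			undef.append(None)
--
-- 		elif level == 'High':
-- 			low.append(None)
-- 			med.append(None)
-- 			high.append('High')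
-- 			undef.append(None)
--
-- 		elif level == 'Undefined':
-- 			low.append(None)
-- 			med.append(None)
-- 			high.append(None)
-- 			undef.append('Undefined')
-- 		else:
-- 			low.append(None)
-- 			med.append(None)
-- 			high.append(None)
-- 			undef.append(None)
--
-- 	low.insert(0,'If Low')
-- 	med.insert(0,'If Medium')
-- 	high.insert(0,'If High')
-- 	undef.insert(0,'If Undefined')
-- 	return low,med,high,undef
-- ===== SOURCE B (Python) =====
-- def threatLevel(levels):
--     tail = levels[1:]
--
--     def column(header, name):
--         return [header] + [name if l == name else None for l in tail]
--
--     return (column('If Low', 'Low'),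
--             column('If Medium', 'Medium'),
--             column('If High', 'High'),
--             column('If Undefined', 'Undefined'))
-- ===== Notes on version B (the rewrite author's own statement) =====
-- stated objective: simpler
-- what changed: Replaces the single loop maintaining four parallel accumulators with four independent passes, each building one column via a comprehension with a prepended header.
import Mathlib
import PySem

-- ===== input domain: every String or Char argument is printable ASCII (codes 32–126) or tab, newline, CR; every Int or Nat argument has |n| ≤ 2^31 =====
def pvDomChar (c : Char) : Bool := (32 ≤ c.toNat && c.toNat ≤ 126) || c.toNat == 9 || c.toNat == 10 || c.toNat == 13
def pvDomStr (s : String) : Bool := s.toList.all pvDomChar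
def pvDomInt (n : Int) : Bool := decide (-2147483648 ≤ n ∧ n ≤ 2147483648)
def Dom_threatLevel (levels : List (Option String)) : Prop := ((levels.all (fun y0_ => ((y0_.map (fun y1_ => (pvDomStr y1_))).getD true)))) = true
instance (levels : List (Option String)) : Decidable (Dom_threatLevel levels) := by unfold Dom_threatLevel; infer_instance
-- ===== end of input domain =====

-- B replaces A's single loop over four parallel accumulators by four independent
-- per-column passes (simpler decomposition; same O(n) cost).

-- ===== PORT A =====
-- loop body of A: one iteration appending to the four accumulators
def tlStep (acc : List (Option String) × List (Option String) × List (Option String) × List (Option String))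
    (level : Option String) : List (Option String) × List (Option String) × List (Option String) × List (Option String) :=
  let (low, med, high, undef) := acc
  if level == some "Low" then
    (low ++ [some "Low"], med ++ [none], high ++ [none], undef ++ [none])
  else if level == some "Medium" then
    (low ++ [none], med ++ [some "Medium"], high ++ [none], undef ++ [none])
  else if level == some "High" then
    (low ++ [none], med ++ [none], high ++ [some "High"], undef ++ [none])
  else if level == some "Undefined" then
    (low ++ [none], med ++ [none], high ++ [none], undef ++ [some "Undefined"])
  else
    (low ++ [none], med ++ [none], high ++ [none], undef ++ [none])

-- one pass over levels[1:], appending to four accumulators, then headers inserted at 0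
def threatLevel (levels : List (Option String)) : List (Option String) × List (Option String) × List (Option String) × List (Option String) :=
  let st := (PySem.List.slice levels (some 1) none).foldl tlStep ([], [], [], [])
  let (low, med, high, undef) := st
  (PySem.List.insert low 0 (some "If Low"),
   PySem.List.insert med 0 (some "If Medium"),
   PySem.List.insert high 0 (some "If High"),
   PySem.List.insert undef 0 (some "If Undefined"))

-- ===== PORT B =====
def tlColumn (tail : List (Option String)) (header name : String) : List (Option String) :=
  [some header] ++ tail.map (fun l => if l == some name then some name else none)

def threatLevel_alt (levels : List (Option String)) : List (Option String) × List (Option String) × List (Option String) × List (Option String) :=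
  let tail := PySem.List.slice levels (some 1) none
  (tlColumn tail "If Low" "Low",
   tlColumn tail "If Medium" "Medium",
   tlColumn tail "If High" "High",
   tlColumn tail "If Undefined" "Undefined")

-- ===== PRECONDITION & SPEC =====
def Spec_threatLevel (levels : List (Option String)) (out : List (Option String) × List (Option String) × List (Option String) × List (Option String)) : Prop := out = threatLevel_alt levels
instance (levels : List (Option String)) (out : List (Option String) × List (Option String) × List (Option String) × List (Option String)) : Decidable (Spec_threatLevel levels out) := by unfold Spec_threatLevel; infer_instance

-- ===== CLAIM (what is proved, stated in full; the proofs are below) =====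
def Claim_equal_threatLevel : Prop := ∀ (levels : List (Option String)), Dom_threatLevel levels → Spec_threatLevel levels (threatLevel levels)

-- ===== LEMMAS AND PROOFS =====

-- the fold's state is always the four columns-so-far appended to the starting prefixes
theorem tl_fold_inv (tail : List (Option String))
    (low med high undef : List (Option String)) :
    tail.foldl tlStep (low, med, high, undef)
    = (low ++ tail.map (fun l => if l == some "Low" then some "Low" else none),
       med ++ tail.map (fun l => if l == some "Medium" then some "Medium" else none),
       high ++ tail.map (fun l => if l == some "High" then some "High" else none),
       undef ++ tail.map (fun l => if l == some "Undefined" then some "Undefined" else none)) := by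
  induction tail generalizing low med high undef with
  | nil => simp
  | cons x xs ih =>
    rw [List.foldl_cons]
    by_cases h1 : x = some "Low"
    · have hs : tlStep (low, med, high, undef) x
          = (low ++ [some "Low"], med ++ [none], high ++ [none], undef ++ [none]) := by
        simp [tlStep, h1]
      rw [hs, ih]
      simp [h1, List.append_assoc]
    · by_cases h2 : x = some "Medium"
      · have hs : tlStep (low, med, high, undef) x
            = (low ++ [none], med ++ [some "Medium"], high ++ [none], undef ++ [none]) := by
          simp [tlStep, h1, h2]
        rw [hs, ih]
        simp [h1, h2, List.append_assoc]
      · by_cases h3 : x = some "High"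
        · have hs : tlStep (low, med, high, undef) x
              = (low ++ [none], med ++ [none], high ++ [some "High"], undef ++ [none]) := by
            simp [tlStep, h1, h2, h3]
          rw [hs, ih]
          simp [h1, h2, h3, List.append_assoc]
        · by_cases h4 : x = some "Undefined"
          · have hs : tlStep (low, med, high, undef) x
                = (low ++ [none], med ++ [none], high ++ [none], undef ++ [some "Undefined"]) := by
              simp [tlStep, h1, h2, h3, h4]
            rw [hs, ih]
            simp [h1, h2, h3, h4, List.append_assoc]
          · have hs : tlStep (low, med, high, undef) x
                = (low ++ [none], med ++ [none], high ++ [none], undef ++ [none]) := by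
              simp [tlStep, h1, h2, h3, h4]
            rw [hs, ih]
            simp [h1, h2, h3, h4, List.append_assoc]

theorem threatLevel_spec : Claim_equal_threatLevel := by
  intro levels _
  show threatLevel levels = threatLevel_alt levels
  simp [threatLevel, threatLevel_alt, tlColumn, tl_fold_inv, PySem.List.insert_zero]
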